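-- pv_equiv track=rewrite | github.com/CaerangManagement/2022-Tensor | Algorithm/Code/Week4/w4_20225191_양진은.py | mixmix
-- ===== SOURCE A (Python) =====
-- def mixRGB(colors: list, K):
--   R = sum([color[0] for color in colors]) // K
--   G = sum([color[1] for color in colors]) // K
--   B = sum([color[2] for color in colors]) // K
--   return [R, G, B]
--
-- def mixmix(colors: list) -> list:
--   colorsSize = len(colors)
--   mixls = []
--   for a in range(colorsSize):
--
--     if (2 > colorsSize) : continue
--     for b in range(a+1, colorsSize):
--       mixls += [mixRGB([colors[a], colors[b]], 2)]
--
--       if (3 > colorsSize) : continue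
--       for c in range(b+1, colorsSize):
--         mixls += [mixRGB([colors[a], colors[b], colors[c]], 3)]
--
--         if (4 > colorsSize) : continue
--         for d in range(c+1, colorsSize):
--           mixls += [mixRGB([colors[a], colors[b], colors[c], colors[d]], 4)]
--
--           if (5 > colorsSize) : continue
--           for e in range(d+1, colorsSize):
--             mixls += [mixRGB([colors[a], colors[b], colors[c], colors[d], colors[e]], 5)]
--
--             if (6 > colorsSize) : continue
--             for f in range(e+1, colorsSize):
--               mixls += [mixRGB([colors[a], colors[b], colors[c], colors[d], colors[e], colors[f]], 6)]
--
--               if (7 > colorsSize) : continue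
--               for g in range(f+1, colorsSize):
--                 mixls += [mixRGB([colors[a], colors[b], colors[c], colors[d], colors[e], colors[f], colors[g]], 7)]
--   return mixls
-- ===== SOURCE B (Python) =====
-- def mixmix(colors: list) -> list:
--   n = len(colors)
--   out = []
--
--   def dfs(prefix, start):
--     k = len(prefix)
--     if k >= 2:
--       out.append([sum(c[0] for c in prefix) // k,
--                   sum(c[1] for c in prefix) // k,
--                   sum(c[2] for c in prefix) // k])
--     if k < 7:
--       for i in range(start, n):
--         dfs(prefix + [colors[i]], i + 1)
--
--   dfs([], 0)
--   return out
-- ===== Notes on version B (the rewrite author's own statement) =====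
-- stated objective: simpler
-- what changed: A's six hand-unrolled nested loops (one per combination size 2..7) are replaced by a single recursive DFS over growing prefixes that emits the averaged color whenever the prefix has size 2..7, reproducing A's interleaved preorder output.
import Mathlib
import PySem

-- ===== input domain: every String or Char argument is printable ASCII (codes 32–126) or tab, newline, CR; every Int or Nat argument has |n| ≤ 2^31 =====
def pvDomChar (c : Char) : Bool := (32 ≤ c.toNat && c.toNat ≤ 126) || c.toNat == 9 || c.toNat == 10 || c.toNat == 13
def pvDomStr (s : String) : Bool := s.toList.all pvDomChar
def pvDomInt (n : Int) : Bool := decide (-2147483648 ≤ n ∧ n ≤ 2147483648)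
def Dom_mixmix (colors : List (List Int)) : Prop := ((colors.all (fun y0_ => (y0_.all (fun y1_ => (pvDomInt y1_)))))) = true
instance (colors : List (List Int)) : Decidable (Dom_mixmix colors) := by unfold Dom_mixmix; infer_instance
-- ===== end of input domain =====

-- B replaces A's six hand-unrolled nested loops by one recursive DFS over growing prefixes
-- (emit at sizes 2..7, recurse while the prefix is shorter than 7); same preorder output, same single
-- floor division per channel; objective: simpler.

-- ===== PORT A =====
-- colors[i] (index always in range when reached on inputs in Pre_)
def pvG (colors : List (List Int)) (i : Int) : List Int := (PySem.List.pyGet? colors i).getD []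
-- color[j] for j = 0,1,2 (in range on Pre_; default never reached there)
def pvCh (c : List Int) (j : Int) : Int := (PySem.List.pyGet? c j).getD 0

def pvMixRGB (cs : List (List Int)) (K : Int) : List Int :=
  [PySem.Int.floordiv ((cs.map (fun c => pvCh c 0)).sum) K,
   PySem.Int.floordiv ((cs.map (fun c => pvCh c 1)).sum) K,
   PySem.Int.floordiv ((cs.map (fun c => pvCh c 2)).sum) K]

def mixmix (colors : List (List Int)) : List (List Int) :=
  let n : Int := colors.length
  let g := pvG colors
  (PySem.List.pyRange 0 n 1).foldl (fun mixls a =>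
    if 2 > n then mixls else
    (PySem.List.pyRange (a+1) n 1).foldl (fun mixls b =>
      let mixls := mixls ++ [pvMixRGB [g a, g b] 2]
      if 3 > n then mixls else
      (PySem.List.pyRange (b+1) n 1).foldl (fun mixls c =>
        let mixls := mixls ++ [pvMixRGB [g a, g b, g c] 3]
        if 4 > n then mixls else
        (PySem.List.pyRange (c+1) n 1).foldl (fun mixls d =>
          let mixls := mixls ++ [pvMixRGB [g a, g b, g c, g d] 4]
          if 5 > n then mixls else
          (PySem.List.pyRange (d+1) n 1).foldl (fun mixls e =>
            let mixls := mixls ++ [pvMixRGB [g a, g b, g c, g d, g e] 5]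
            if 6 > n then mixls else
            (PySem.List.pyRange (e+1) n 1).foldl (fun mixls f =>
              let mixls := mixls ++ [pvMixRGB [g a, g b, g c, g d, g e, g f] 6]
              if 7 > n then mixls else
              (PySem.List.pyRange (f+1) n 1).foldl (fun mixls gg =>
                mixls ++ [pvMixRGB [g a, g b, g c, g d, g e, g f, g gg] 7])
                mixls) mixls) mixls) mixls) mixls) mixls) []

-- ===== PORT B =====
-- Source B's emission: if len(prefix) >= 2, one averaged color (floor division per channel)
def pvEmit (pre : List (List Int)) : List (List Int) :=
  let k : Int := pre.length
  if 2 ≤ k then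
    [[PySem.Int.floordiv ((pre.map (fun c => pvCh c 0)).sum) k,
      PySem.Int.floordiv ((pre.map (fun c => pvCh c 1)).sum) k,
      PySem.Int.floordiv ((pre.map (fun c => pvCh c 2)).sum) k]]
  else []

-- Source B's dfs; the Python guard 'if k < 7' is carried as fuel = 7 - len(prefix)
def dfsB (colors : List (List Int)) : Nat → List (List Int) → Int → List (List Int)
  | 0, pre, _ => pvEmit pre
  | fuel+1, pre, start =>
      pvEmit pre ++
      (PySem.List.pyRange start (colors.length : Int) 1).foldl
        (fun acc i => acc ++ dfsB colors fuel (pre ++ [pvG colors i]) (i+1)) []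

def mixmix_alt (colors : List (List Int)) : List (List Int) := dfsB colors 7 [] 0

-- ===== PRECONDITION & SPEC =====
-- Pre_ excludes exactly the inputs on which Python A raises IndexError: with at least two colors,
-- every color is read at channels 0,1,2, so each inner list must have length ≥ 3; with ≤ 1 colors
-- nothing is read and A returns [].
def Pre_mixmix (colors : List (List Int)) : Prop :=
  colors.length ≤ 1 ∨ colors.all (fun c => 3 ≤ c.length) = true
instance (colors : List (List Int)) : Decidable (Pre_mixmix colors) := by unfold Pre_mixmix; infer_instance
def pvWitness_mixmix : List (List Int) := [[255, 0, 10], [3, 7, 200], [1, 2, 3]]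

def Spec_mixmix (colors : List (List Int)) (out : List (List Int)) : Prop := out = mixmix_alt colors
instance (colors : List (List Int)) (out : List (List Int)) : Decidable (Spec_mixmix colors out) := by unfold Spec_mixmix; infer_instance

-- ===== CLAIM (what is proved, stated in full; the proofs are below) =====
def Claim_equal_mixmix : Prop := ∀ (colors : List (List Int)), Dom_mixmix colors → Pre_mixmix colors → Spec_mixmix colors (mixmix colors)

-- ===== LEMMAS AND PROOFS =====

-- Common normal form of both programs: the combination tree written as nested flatMaps (N7 innermost).
def N7 (colors : List (List Int)) (x1 x2 x3 x4 x5 x6 : List Int) (s : Int) : List (List Int) :=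
  (PySem.List.pyRange s (colors.length : Int) 1).flatMap
    (fun i => [pvMixRGB [x1, x2, x3, x4, x5, x6, pvG colors i] 7])

def N6 (colors : List (List Int)) (x1 x2 x3 x4 x5 : List Int) (s : Int) : List (List Int) :=
  (PySem.List.pyRange s (colors.length : Int) 1).flatMap
    (fun i => [pvMixRGB [x1, x2, x3, x4, x5, pvG colors i] 6] ++
      (if 7 > (colors.length : Int) then [] else N7 colors x1 x2 x3 x4 x5 (pvG colors i) (i+1)))

def N5 (colors : List (List Int)) (x1 x2 x3 x4 : List Int) (s : Int) : List (List Int) :=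
  (PySem.List.pyRange s (colors.length : Int) 1).flatMap
    (fun i => [pvMixRGB [x1, x2, x3, x4, pvG colors i] 5] ++
      (if 6 > (colors.length : Int) then [] else N6 colors x1 x2 x3 x4 (pvG colors i) (i+1)))

def N4 (colors : List (List Int)) (x1 x2 x3 : List Int) (s : Int) : List (List Int) :=
  (PySem.List.pyRange s (colors.length : Int) 1).flatMap
    (fun i => [pvMixRGB [x1, x2, x3, pvG colors i] 4] ++
      (if 5 > (colors.length : Int) then [] else N5 colors x1 x2 x3 (pvG colors i) (i+1)))

def N3 (colors : List (List Int)) (x1 x2 : List Int) (s : Int) : List (List Int) :=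
  (PySem.List.pyRange s (colors.length : Int) 1).flatMap
    (fun i => [pvMixRGB [x1, x2, pvG colors i] 3] ++
      (if 4 > (colors.length : Int) then [] else N4 colors x1 x2 (pvG colors i) (i+1)))

def N2 (colors : List (List Int)) (x1 : List Int) (s : Int) : List (List Int) :=
  (PySem.List.pyRange s (colors.length : Int) 1).flatMap
    (fun i => [pvMixRGB [x1, pvG colors i] 2] ++
      (if 3 > (colors.length : Int) then [] else N3 colors x1 (pvG colors i) (i+1)))

def N1 (colors : List (List Int)) : List (List Int) :=
  (PySem.List.pyRange 0 (colors.length : Int) 1).flatMap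
    (fun i => if 2 > (colors.length : Int) then [] else N2 colors (pvG colors i) (i+1))

theorem B6L (colors : List (List Int)) (x1 x2 x3 x4 x5 x6 : List Int) (s : Int) (hs : (6:Int) ≤ s) :
    dfsB colors 1 [x1, x2, x3, x4, x5, x6] s
    = pvEmit [x1, x2, x3, x4, x5, x6] ++
      (if 7 > (colors.length : Int) then [] else N7 colors x1 x2 x3 x4 x5 x6 s) := by
  rw [dfsB, PySem.List.foldl_append_eq_flatMap, List.nil_append]
  congr 1
  by_cases h : 7 > (colors.length : Int)
  · rw [if_pos h, PySem.List.pyRange_one_eq_nil (by omega)]; rfl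
  · rw [if_neg h]
    simp only [N7]
    refine List.flatMap_congr (fun i hi => ?_)
    simp only [List.cons_append, List.nil_append, dfsB, pvEmit, pvMixRGB]
    norm_num

theorem B5L (colors : List (List Int)) (x1 x2 x3 x4 x5 : List Int) (s : Int) (hs : (5:Int) ≤ s) :
    dfsB colors 2 [x1, x2, x3, x4, x5] s
    = pvEmit [x1, x2, x3, x4, x5] ++
      (if 6 > (colors.length : Int) then [] else N6 colors x1 x2 x3 x4 x5 s) := by
  rw [dfsB, PySem.List.foldl_append_eq_flatMap, List.nil_append]
  congr 1
  by_cases h : 6 > (colors.length : Int)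
  · rw [if_pos h, PySem.List.pyRange_one_eq_nil (by omega)]; rfl
  · rw [if_neg h]
    simp only [N6]
    refine List.flatMap_congr (fun i hi => ?_)
    have hi' := (PySem.List.mem_pyRange_one).mp hi
    rw [show ([x1, x2, x3, x4, x5] ++ [pvG colors i]) = [x1, x2, x3, x4, x5, pvG colors i] from rfl]
    rw [B6L colors x1 x2 x3 x4 x5 (pvG colors i) (i+1) (by omega)]
    congr 1

theorem B4L (colors : List (List Int)) (x1 x2 x3 x4 : List Int) (s : Int) (hs : (4:Int) ≤ s) :
    dfsB colors 3 [x1, x2, x3, x4] s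
    = pvEmit [x1, x2, x3, x4] ++
      (if 5 > (colors.length : Int) then [] else N5 colors x1 x2 x3 x4 s) := by
  rw [dfsB, PySem.List.foldl_append_eq_flatMap, List.nil_append]
  congr 1
  by_cases h : 5 > (colors.length : Int)
  · rw [if_pos h, PySem.List.pyRange_one_eq_nil (by omega)]; rfl
  · rw [if_neg h]
    simp only [N5]
    refine List.flatMap_congr (fun i hi => ?_)
    have hi' := (PySem.List.mem_pyRange_one).mp hi
    rw [show ([x1, x2, x3, x4] ++ [pvG colors i]) = [x1, x2, x3, x4, pvG colors i] from rfl]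
    rw [B5L colors x1 x2 x3 x4 (pvG colors i) (i+1) (by omega)]
    congr 1

theorem B3L (colors : List (List Int)) (x1 x2 x3 : List Int) (s : Int) (hs : (3:Int) ≤ s) :
    dfsB colors 4 [x1, x2, x3] s
    = pvEmit [x1, x2, x3] ++
      (if 4 > (colors.length : Int) then [] else N4 colors x1 x2 x3 s) := by
  rw [dfsB, PySem.List.foldl_append_eq_flatMap, List.nil_append]
  congr 1
  by_cases h : 4 > (colors.length : Int)
  · rw [if_pos h, PySem.List.pyRange_one_eq_nil (by omega)]; rfl
  · rw [if_neg h]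
    simp only [N4]
    refine List.flatMap_congr (fun i hi => ?_)
    have hi' := (PySem.List.mem_pyRange_one).mp hi
    rw [show ([x1, x2, x3] ++ [pvG colors i]) = [x1, x2, x3, pvG colors i] from rfl]
    rw [B4L colors x1 x2 x3 (pvG colors i) (i+1) (by omega)]
    congr 1

theorem B2L (colors : List (List Int)) (x1 x2 : List Int) (s : Int) (hs : (2:Int) ≤ s) :
    dfsB colors 5 [x1, x2] s
    = pvEmit [x1, x2] ++
      (if 3 > (colors.length : Int) then [] else N3 colors x1 x2 s) := by
  rw [dfsB, PySem.List.foldl_append_eq_flatMap, List.nil_append]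
  congr 1
  by_cases h : 3 > (colors.length : Int)
  · rw [if_pos h, PySem.List.pyRange_one_eq_nil (by omega)]; rfl
  · rw [if_neg h]
    simp only [N3]
    refine List.flatMap_congr (fun i hi => ?_)
    have hi' := (PySem.List.mem_pyRange_one).mp hi
    rw [show ([x1, x2] ++ [pvG colors i]) = [x1, x2, pvG colors i] from rfl]
    rw [B3L colors x1 x2 (pvG colors i) (i+1) (by omega)]
    congr 1

theorem B1L (colors : List (List Int)) (x1 : List Int) (s : Int) (hs : (1:Int) ≤ s) :
    dfsB colors 6 [x1] s
    = pvEmit [x1] ++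
      (if 2 > (colors.length : Int) then [] else N2 colors x1 s) := by
  rw [dfsB, PySem.List.foldl_append_eq_flatMap, List.nil_append]
  congr 1
  by_cases h : 2 > (colors.length : Int)
  · rw [if_pos h, PySem.List.pyRange_one_eq_nil (by omega)]; rfl
  · rw [if_neg h]
    simp only [N2]
    refine List.flatMap_congr (fun i hi => ?_)
    have hi' := (PySem.List.mem_pyRange_one).mp hi
    rw [show ([x1] ++ [pvG colors i]) = [x1, pvG colors i] from rfl]
    rw [B2L colors x1 (pvG colors i) (i+1) (by omega)]
    congr 1

theorem B_eq_N (colors : List (List Int)) : mixmix_alt colors = N1 colors := by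
  rw [mixmix_alt, dfsB, PySem.List.foldl_append_eq_flatMap, List.nil_append]
  simp only [List.nil_append]
  rw [show pvEmit [] = [] from rfl, List.nil_append, N1]
  refine List.flatMap_congr (fun i hi => ?_)
  have hi' := (PySem.List.mem_pyRange_one).mp hi
  rw [B1L colors (pvG colors i) (i+1) (by omega)]
  rw [show pvEmit [pvG colors i] = [] from rfl, List.nil_append]

-- shape lemmas used to normalise A's accumulator-threading folds into flatMaps
theorem pv_ite_app {α : Type} {c : Prop} [Decidable c] (m a b : List α) :
    (if c then m ++ a else m ++ (a ++ b)) = m ++ (a ++ (if c then [] else b)) := by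
  split_ifs <;> simp

theorem pv_ite_app0 {α : Type} {c : Prop} [Decidable c] (m b : List α) :
    (if c then m else m ++ b) = m ++ (if c then [] else b) := by
  split_ifs <;> simp

theorem A_eq_N (colors : List (List Int)) : mixmix colors = N1 colors := by
  simp only [mixmix, PySem.List.foldl_append_eq_flatMap, pv_ite_app, pv_ite_app0,
    List.append_assoc, List.nil_append, N1, N2, N3, N4, N5, N6, N7]

-- ===== VERDICT (by name: the statement is the Claim_ definition above) =====
theorem mixmix_spec : Claim_equal_mixmix := by
  intro colors _ _
  show mixmix colors = mixmix_alt colors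
  rw [A_eq_N, B_eq_N]
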